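-- pv_equiv track=rewrite | github.com/shhuan1989/algorithms | codeforces/1311F.py | solve
-- ===== SOURCE A (Python) =====
-- def solve(N, X, S):
--     si = {}
--     ss = list(sorted(set(S)))
--     for i, s in enumerate(ss):
--         si[s] = i
--
--     xs = [(x, si[s]) for x, s in zip(X, S)]
--     xs.sort()
--
--
--     bitc = [0 for _ in range(N+1)]
--     bitx = [0 for _ in range(N+1)]
--
--     def add(index, val):
--         while index <= N:
--             bitc[index] += 1
--             bitx[index] += val
--             index |= index + 1
--
--     def get(index):
--         count, xsum = 0, 0
--         while index >= 0:
--             count += bitc[index]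
--             xsum += bitx[index]
--             index = (index & (index + 1)) - 1
--
--         return count, xsum
--
--     ans = 0
--     for x, s in xs:
--         count, xsum = get(s)
--         ans += count * x - xsum
--         add(s, x)
--
--     return ans
-- ===== SOURCE B (Python) =====
-- def h(p, q):
--     if p[0] < q[0] and p[1] <= q[1]:
--         return q[0] - p[0]
--     if q[0] < p[0] and q[1] <= p[1]:
--         return p[0] - q[0]
--     return 0
--
-- def solve(N, X, S):
--     total = 0
--     rest = list(zip(X, S))
--     while rest:
--         p, rest = rest[0], rest[1:]
--         for q in rest:
--             total = total + h(p, q)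
--     return total
-- ===== Notes on version B (the rewrite author's own statement) =====
-- stated objective: simpler
-- what changed: B drops A's rank-compression dict, tuple sort and Fenwick tree (two binary-indexed arrays) and instead sums h over all unordered pairs of zip(X, S) directly, comparing the strings themselves.
import Mathlib
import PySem

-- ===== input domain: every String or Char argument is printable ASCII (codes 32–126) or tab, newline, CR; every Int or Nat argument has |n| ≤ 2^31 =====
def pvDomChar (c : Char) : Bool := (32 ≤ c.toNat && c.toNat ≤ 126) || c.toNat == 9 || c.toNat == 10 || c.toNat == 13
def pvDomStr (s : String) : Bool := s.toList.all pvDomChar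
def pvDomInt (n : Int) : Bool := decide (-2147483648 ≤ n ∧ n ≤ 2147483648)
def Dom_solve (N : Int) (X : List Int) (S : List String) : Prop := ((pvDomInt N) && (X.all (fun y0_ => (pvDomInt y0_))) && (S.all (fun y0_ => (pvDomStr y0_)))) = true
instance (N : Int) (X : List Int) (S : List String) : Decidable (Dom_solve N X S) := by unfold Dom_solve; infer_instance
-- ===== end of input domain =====

-- B replaces A's sort + Fenwick-tree aggregation by a direct sum of h over all unordered pairs of zip(X, S): simpler, no rank map, no tree (and no index crash).


-- ===== PORT A =====
-- termination fact cited by the ports' while-loops (Python's loop indices are nonnegative there)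
theorem pvBandLe (i : Int) (h : 0 ≤ i) : PySem.Int.band i (i + 1) ≤ i := by
  have h1 : i = ((i.toNat : Nat) : Int) := (Int.toNat_of_nonneg h).symm
  rw [h1]
  have h2 : ((i.toNat : Nat) : Int) + 1 = ((i.toNat + 1 : Nat) : Int) := by push_cast; ring
  rw [h2, PySem.Int.band_natCast]
  exact_mod_cast Nat.and_le_left

-- inner while-loop of A's `add` (the guard's second conjunct is a termination guard: it holds whenever 0 ≤ index, which is the case on every call A makes)
def solveAdd (N : Int) (bitc bitx : List Int) (index val : Int) : List Int × List Int :=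
  if h : index ≤ N ∧ index < PySem.Int.bor index (index + 1) then
    solveAdd N (PySem.List.pySetD bitc index (PySem.List.pyGetD bitc index 0 + 1))
               (PySem.List.pySetD bitx index (PySem.List.pyGetD bitx index 0 + val))
               (PySem.Int.bor index (index + 1)) val
  else (bitc, bitx)
termination_by (N + 1 - index).toNat
decreasing_by omega

-- inner while-loop of A's `get`
def solveGet (bitc bitx : List Int) (count xsum index : Int) : Int × Int :=
  if h : 0 ≤ index then
    solveGet bitc bitx (count + PySem.List.pyGetD bitc index 0) (xsum + PySem.List.pyGetD bitx index 0)
      (PySem.Int.band index (index + 1) - 1)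
  else (count, xsum)
termination_by (index + 1).toNat
decreasing_by have hb := pvBandLe index h; omega

def solve (N : Int) (X : List Int) (S : List String) : Int :=
  -- Python's locals ss/si/xs/bitc/bitx and the loop temporaries count/xsum are inlined
  -- (each named value appears exactly where Python computes/reads it):
  -- si[s] lookup: the key is always present (s comes from S, si was built over set(S)), so `.getD 0` is exact
  ((PySem.List.sorted2
      ((X.zip S).map (fun p => (p.1,
        ((((PySem.List.enumerate (PySem.List.sorted (PySem.Set.ofList S) (fun x => x) false) 0).foldl
            (fun d q => d.insert q.2 q.1) (PySem.Dict.empty : PySem.Dict String Int)).get? p.2).getD 0))))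
      (fun p => p.1) (fun p => p.2) false).foldl
    (fun st p =>
      ((solveAdd N st.1 st.2.1 p.2 p.1).1,
       (solveAdd N st.1 st.2.1 p.2 p.1).2,
       st.2.2 + (solveGet st.1 st.2.1 0 0 p.2).1 * p.1 - (solveGet st.1 st.2.1 0 0 p.2).2))
    ((PySem.List.pyRange 0 (N + 1) 1).map (fun _ => (0 : Int)),
     (PySem.List.pyRange 0 (N + 1) 1).map (fun _ => (0 : Int)), (0 : Int))).2.2

-- ===== PORT B =====
def hpair (p q : Int × String) : Int :=
  if p.1 < q.1 ∧ p.2 ≤ q.2 then q.1 - p.1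
  else if q.1 < p.1 ∧ q.2 ≤ p.2 then p.1 - q.1
  else 0

def solveAltLoop : List (Int × String) → Int → Int
  | [], total => total
  | p :: rest, total => solveAltLoop rest (rest.foldl (fun t q => t + hpair p q) total)

def solve_alt (N : Int) (X : List Int) (S : List String) : Int :=
  solveAltLoop (X.zip S) 0

-- ===== PRECONDITION & SPEC =====
-- Pre_ excludes exactly the inputs where A raises IndexError: some paired string whose rank
-- (number of distinct smaller strings in S) exceeds N, so A indexes its size-(N+1) Fenwick arrays out of range.
def Pre_solve (N : Int) (X : List Int) (S : List String) : Prop :=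
  ∀ p ∈ X.zip S, (((PySem.Set.ofList S).countP (fun t => PySem.Chars.strLt t.toList p.2.toList) : Nat) : Int) ≤ N
instance (N : Int) (X : List Int) (S : List String) : Decidable (Pre_solve N X S) := by unfold Pre_solve; infer_instance
def pvWitness_solve : Int × List Int × List String := (1, [1, 2], ["a", "b"])

def Spec_solve (N : Int) (X : List Int) (S : List String) (out : Int) : Prop := out = solve_alt N X S
instance (N : Int) (X : List Int) (S : List String) (out : Int) : Decidable (Spec_solve N X S out) := by unfold Spec_solve; infer_instance

-- ===== CLAIM (what is proved, stated in full; the proofs are below) =====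
def Claim_equal_solve : Prop := ∀ (N : Int) (X : List Int) (S : List String), Dom_solve N X S → Pre_solve N X S → Spec_solve N X S (solve N X S)

-- ===== LEMMAS AND PROOFS =====

/- ---------- bit-manipulation facts (Fenwick tree index arithmetic), first on Nat ---------- -/

theorem land2 (m : Nat) : (2*m) &&& (2*m+1) = 2*m := by
  apply Nat.eq_of_testBit_eq; intro i
  rw [Nat.testBit_land]
  cases i with
  | zero =>
    simp only [Nat.testBit_zero]
    have h : (2*m) % 2 = 0 := by omega
    simp [h]
  | succ i =>
    simp only [Nat.testBit_succ,
      show 2*m/2 = m from by omega, show (2*m+1)/2 = m from by omega, Bool.and_self]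
theorem land2' (m : Nat) : (2*m+1) &&& (2*m+1+1) = 2*(m &&& (m+1)) := by
  apply Nat.eq_of_testBit_eq; intro i
  rw [Nat.testBit_land]
  cases i with
  | zero =>
    simp only [Nat.testBit_zero]
    have h1 : (2*m+1+1) % 2 = 0 := by omega
    have h2 : (2*(m &&& (m+1))) % 2 = 0 := by omega
    simp [h1, h2]
  | succ i =>
    simp only [Nat.testBit_succ,
      show (2*m+1)/2 = m from by omega, show (2*m+1+1)/2 = m+1 from by omega,
      show (2*(m &&& (m+1)))/2 = m &&& (m+1) from by omega, Nat.testBit_land]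
theorem lor2 (m : Nat) : (2*m) ||| (2*m+1) = 2*m+1 := by
  apply Nat.eq_of_testBit_eq; intro i
  rw [Nat.testBit_lor]
  cases i with
  | zero =>
    simp only [Nat.testBit_zero]
    have h1 : (2*m) % 2 = 0 := by omega
    have h2 : (2*m+1) % 2 = 1 := by omega
    simp [h1, h2]
  | succ i =>
    simp only [Nat.testBit_succ,
      show 2*m/2 = m from by omega, show (2*m+1)/2 = m from by omega, Bool.or_self]
theorem lor2' (m : Nat) : (2*m+1) ||| (2*m+1+1) = 2*(m ||| (m+1)) + 1 := by
  apply Nat.eq_of_testBit_eq; intro i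
  rw [Nat.testBit_lor]
  cases i with
  | zero =>
    simp only [Nat.testBit_zero]
    have h1 : (2*m+1) % 2 = 1 := by omega
    have h2 : (2*(m ||| (m+1)) + 1) % 2 = 1 := by omega
    simp [h1, h2]
  | succ i =>
    simp only [Nat.testBit_succ,
      show (2*m+1)/2 = m from by omega, show (2*m+1+1)/2 = m+1 from by omega,
      show (2*(m ||| (m+1)) + 1)/2 = m ||| (m+1) from by omega, Nat.testBit_lor]

theorem lt_lorN (n : Nat) : n < n ||| (n+1) := by
  induction n using Nat.strong_induction_on with
  | _ n ih =>
    obtain ⟨m, rfl | rfl⟩ := Nat.even_or_odd' n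
    · rw [lor2]; omega
    · rw [lor2']
      have := ih m (by omega)
      omega
theorem land_lor_leN (n : Nat) : (n ||| (n+1)) &&& ((n ||| (n+1)) + 1) ≤ n &&& (n+1) := by
  induction n using Nat.strong_induction_on with
  | _ n ih =>
    obtain ⟨m, rfl | rfl⟩ := Nat.even_or_odd' n
    · rw [lor2, land2, land2']
      have := Nat.and_le_left (n := m) (m := m+1)
      omega
    · rw [lor2', land2', land2']
      have := ih m (by omega)
      omega
theorem lor_le_ofN (j : Nat) : ∀ r : Nat, r < j → j &&& (j+1) ≤ r → r ||| (r+1) ≤ j := by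
  induction j using Nat.strong_induction_on with
  | _ j ih =>
    intro r hrj hlo
    obtain ⟨a, rfl | rfl⟩ := Nat.even_or_odd' r
    · rw [lor2]; omega
    · rw [lor2']
      obtain ⟨b, rfl | rfl⟩ := Nat.even_or_odd' j
      · rw [land2] at hlo; omega
      · rw [land2'] at hlo
        have hb := ih b (by omega) a (by omega) (by omega)
        omega
theorem land_monoN (i : Nat) : ∀ j : Nat, i &&& (i+1) ≤ j → j ≤ i → i &&& (i+1) ≤ j &&& (j+1) := by
  induction i using Nat.strong_induction_on with
  | _ i ih =>
    intro j h1 h2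
    obtain ⟨m, rfl | rfl⟩ := Nat.even_or_odd' i
    · rw [land2] at h1 ⊢
      have : j = 2*m := by omega
      subst this
      rw [land2]
    · rw [land2'] at h1 ⊢
      obtain ⟨b, rfl | rfl⟩ := Nat.even_or_odd' j
      · rw [land2]; omega
      · rw [land2']
        have := ih m (by omega) b (by omega) (by omega)
        omega

/- ---------- the same facts on Int, about A's `index & (index+1)` and `index | (index+1)` ---------- -/

def loI (i : Int) : Int := PySem.Int.band i (i + 1)
def nxI (i : Int) : Int := PySem.Int.bor i (i + 1)

theorem loI_eq (i : Int) (h : 0 ≤ i) : loI i = ((i.toNat &&& (i.toNat+1) : Nat) : Int) := by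
  unfold loI
  conv_lhs => rw [show i = ((i.toNat : Nat) : Int) from (Int.toNat_of_nonneg h).symm]
  rw [show ((i.toNat : Nat) : Int) + 1 = ((i.toNat + 1 : Nat) : Int) by push_cast; ring]
  rw [PySem.Int.band_natCast]
theorem nxI_eq (i : Int) (h : 0 ≤ i) : nxI i = ((i.toNat ||| (i.toNat+1) : Nat) : Int) := by
  unfold nxI
  conv_lhs => rw [show i = ((i.toNat : Nat) : Int) from (Int.toNat_of_nonneg h).symm]
  rw [show ((i.toNat : Nat) : Int) + 1 = ((i.toNat + 1 : Nat) : Int) by push_cast; ring]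
  rw [PySem.Int.bor_natCast]
theorem loI_nonneg (i : Int) (h : 0 ≤ i) : 0 ≤ loI i := by
  rw [loI_eq i h]; exact Int.natCast_nonneg _
theorem loI_le (i : Int) (h : 0 ≤ i) : loI i ≤ i := pvBandLe i h
theorem lt_nxI (i : Int) (h : 0 ≤ i) : i < nxI i := by
  rw [nxI_eq i h]
  have := lt_lorN i.toNat
  omega
theorem loI_nxI_le (i : Int) (h : 0 ≤ i) : loI (nxI i) ≤ loI i := by
  have hn : 0 ≤ nxI i := le_of_lt (lt_of_le_of_lt h (lt_nxI i h))
  rw [loI_eq i h, loI_eq (nxI i) hn]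
  have he : (nxI i).toNat = i.toNat ||| (i.toNat + 1) := by
    have := nxI_eq i h; omega
  rw [he]
  have := land_lor_leN i.toNat
  omega
theorem nxI_le (r j : Int) (h0 : 0 ≤ r) (h1 : r < j) (h2 : loI j ≤ r) : nxI r ≤ j := by
  have hj : (0:Int) ≤ j := by omega
  rw [loI_eq j hj] at h2
  rw [nxI_eq r h0]
  have := lor_le_ofN j.toNat r.toNat (by omega) (by omega)
  omega
theorem loI_mono (i j : Int) (h0 : 0 ≤ i) (h1 : loI i ≤ j) (h2 : j ≤ i) : loI i ≤ loI j := by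
  have hlo := loI_nonneg i h0
  have hj : (0:Int) ≤ j := by omega
  rw [loI_eq i h0] at h1 ⊢
  rw [loI_eq j hj]
  have := land_monoN i.toNat j.toNat (by omega) (by omega)
  omega

/- ---------- counting model of the Fenwick arrays ---------- -/

def cntR : List (Int × Int) → Int → Int → Int
  | [], _, _ => 0
  | e :: t, a, b => (if a ≤ e.2 ∧ e.2 ≤ b then 1 else 0) + cntR t a b

def sxR : List (Int × Int) → Int → Int → Int
  | [], _, _ => 0
  | e :: t, a, b => (if a ≤ e.2 ∧ e.2 ≤ b then e.1 else 0) + sxR t a b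

theorem cntR_neg (ps : List (Int × Int)) (a b : Int) (h : b < a) : cntR ps a b = 0 := by
  induction ps with
  | nil => rfl
  | cons e t ih => rw [cntR, if_neg (by omega), ih]; ring
theorem sxR_neg (ps : List (Int × Int)) (a b : Int) (h : b < a) : sxR ps a b = 0 := by
  induction ps with
  | nil => rfl
  | cons e t ih => rw [sxR, if_neg (by omega), ih]; ring
theorem cntR_split (ps : List (Int × Int)) (a t b : Int) (h1 : a ≤ t) (h2 : t ≤ b + 1) :
    cntR ps a b = cntR ps a (t-1) + cntR ps t b := by
  induction ps with
  | nil => simp [cntR]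
  | cons e l ih =>
    simp only [cntR]
    rw [ih]
    split_ifs <;> omega
theorem sxR_split (ps : List (Int × Int)) (a t b : Int) (h1 : a ≤ t) (h2 : t ≤ b + 1) :
    sxR ps a b = sxR ps a (t-1) + sxR ps t b := by
  induction ps with
  | nil => simp [sxR]
  | cons e l ih =>
    simp only [sxR]
    rw [ih]
    split_ifs <;> omega
theorem cntR_append (ps qs : List (Int × Int)) (a b : Int) :
    cntR (ps ++ qs) a b = cntR ps a b + cntR qs a b := by
  induction ps with
  | nil => simp [cntR]
  | cons e l ih => simp only [List.cons_append, cntR, ih]; ring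
theorem sxR_append (ps qs : List (Int × Int)) (a b : Int) :
    sxR (ps ++ qs) a b = sxR ps a b + sxR qs a b := by
  induction ps with
  | nil => simp [sxR]
  | cons e l ih => simp only [List.cons_append, sxR, ih]; ring

/- ---------- pair sums ---------- -/

def pairSum {α : Type} (h : α → α → Int) : List α → Int
  | [] => 0
  | a :: t => (t.map (h a)).sum + pairSum h t

def gA (a b : Int × Int) : Int := if a.2 ≤ b.2 then b.1 - a.1 else 0

def hR (a b : Int × Int) : Int :=
  if a.1 < b.1 ∧ a.2 ≤ b.2 then b.1 - a.1
  else if b.1 < a.1 ∧ b.2 ≤ a.2 then a.1 - b.1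
  else 0

def lexLe (a b : Int × Int) : Prop := a.1 < b.1 ∨ (a.1 = b.1 ∧ a.2 ≤ b.2)

theorem pairSum_append_singleton {α : Type} (h : α → α → Int) (l : List α) (p : α) :
    pairSum h (l ++ [p]) = pairSum h l + (l.map (fun e => h e p)).sum := by
  induction l with
  | nil => simp [pairSum]
  | cons a t ih =>
    simp only [List.cons_append, pairSum, List.map_append, List.sum_append, List.map_cons,
      List.sum_cons, List.map_nil, List.sum_nil, ih]
    ring

theorem pairSum_perm {α : Type} (h : α → α → Int) (hsym : ∀ a b, h a b = h b a)
    {l l' : List α} (hp : l.Perm l') : pairSum h l = pairSum h l' := by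
  induction hp with
  | nil => rfl
  | cons x hp ih => rw [pairSum, pairSum, ih, (hp.map (h x)).sum_eq]
  | swap x y l =>
    simp only [pairSum, List.map_cons, List.sum_cons]
    rw [hsym x y]
    ring
  | trans _ _ ih1 ih2 => rw [ih1, ih2]

theorem pairSum_congr_pairwise {α : Type} {R : α → α → Prop} {l : List α}
    (hR : l.Pairwise R) (g h : α → α → Int) (hcong : ∀ a b, R a b → g a b = h a b) :
    pairSum g l = pairSum h l := by
  induction l with
  | nil => rfl
  | cons a t ih =>
    rw [List.pairwise_cons] at hR
    rw [pairSum, pairSum, ih hR.2, List.map_congr_left (fun b hb => hcong a b (hR.1 b hb))]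

theorem pairSum_map {α β : Type} (h : β → β → Int) (f : α → β) (l : List α) :
    pairSum h (l.map f) = pairSum (fun a b => h (f a) (f b)) l := by
  induction l with
  | nil => rfl
  | cons a t ih => rw [List.map_cons, pairSum, pairSum, ih, List.map_map]; rfl

theorem pairSum_congr_mem {α : Type} (g h : α → α → Int) (l : List α)
    (hc : ∀ a ∈ l, ∀ b ∈ l, g a b = h a b) : pairSum g l = pairSum h l := by
  induction l with
  | nil => rfl
  | cons a t ih =>
    rw [pairSum, pairSum,
      List.map_congr_left (fun b hb => hc a List.mem_cons_self b (List.mem_cons_of_mem a hb)),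
      ih (fun x hx y hy => hc x (List.mem_cons_of_mem a hx) y (List.mem_cons_of_mem a hy))]

theorem contrib (ps : List (Int × Int)) (t x : Int) (h : ∀ e ∈ ps, 0 ≤ e.2) :
    cntR ps 0 t * x - sxR ps 0 t = (ps.map (fun e => gA e (x, t))).sum := by
  induction ps with
  | nil => simp [cntR, sxR]
  | cons e l ih =>
    have he := h e List.mem_cons_self
    have ih2 := ih (fun a ha => h a (List.mem_cons_of_mem e ha))
    simp only [cntR, sxR, List.map_cons, List.sum_cons, gA]
    simp only [gA] at ih2
    by_cases hc : e.2 ≤ t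
    · rw [if_pos ⟨he, hc⟩, if_pos ⟨he, hc⟩, if_pos hc]
      linear_combination ih2
    · rw [if_neg (by tauto), if_neg (by tauto), if_neg hc]
      linear_combination ih2

/- ---------- the Fenwick invariant ---------- -/

def FenInv (N : Int) (ps : List (Int × Int)) (bc bx : List Int) : Prop :=
  bc.length = (N + 1).toNat ∧ bx.length = (N + 1).toNat ∧
  ∀ i : Int, 0 ≤ i → i ≤ N →
    PySem.List.pyGetD bc i 0 = cntR ps (loI i) i ∧ PySem.List.pyGetD bx i 0 = sxR ps (loI i) i

theorem pyGetD_nonneg (xs : List Int) (i : Int) (h : 0 ≤ i) :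
    PySem.List.pyGetD xs i 0 = xs.getD i.toNat 0 := by
  conv_lhs => rw [show i = ((i.toNat : Nat) : Int) from (Int.toNat_of_nonneg h).symm]
  rw [PySem.List.pyGetD_natCast]

theorem pyGetD_pySetD' (xs : List Int) (j i v : Int) (hj : 0 ≤ j) (hjl : j < (xs.length : Int)) (hi : 0 ≤ i) :
    PySem.List.pyGetD (PySem.List.pySetD xs j v) i 0 = if i = j then v else PySem.List.pyGetD xs i 0 := by
  rw [PySem.List.pySetD_of_nonneg xs v hj, pyGetD_nonneg _ _ hi, pyGetD_nonneg _ _ hi]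
  by_cases hij : i = j
  · subst hij
    rw [if_pos rfl, List.getD_eq_getElem?_getD, List.getElem?_set_self (by omega)]
    simp
  · rw [if_neg hij, List.getD_eq_getElem?_getD, List.getD_eq_getElem?_getD,
      List.getElem?_set_ne (by omega)]

theorem solveGet_spec (N : Int) (ps : List (Int × Int)) (bc bx : List Int) (hInv : FenInv N ps bc bx) :
    ∀ (n : Nat) (idx : Int), (idx + 1).toNat = n → idx ≤ N → ∀ c x,
      solveGet bc bx c x idx = (c + cntR ps 0 idx, x + sxR ps 0 idx) := by
  intro n
  induction n using Nat.strong_induction_on with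
  | _ n ih =>
    intro idx hn hidx c x
    rw [solveGet]
    by_cases h0 : 0 ≤ idx
    · rw [dif_pos h0]
      have hlo0 : 0 ≤ loI idx := loI_nonneg idx h0
      have hlole : loI idx ≤ idx := loI_le idx h0
      obtain ⟨hlc, hlx⟩ := hInv.2.2 idx h0 hidx
      have harg : PySem.Int.band idx (idx + 1) - 1 = loI idx - 1 := rfl
      rw [harg, ih (loI idx - 1 + 1).toNat (by omega) (loI idx - 1) rfl (by omega)]
      have hc := cntR_split ps 0 (loI idx) idx (by omega) (by omega)
      have hx := sxR_split ps 0 (loI idx) idx (by omega) (by omega)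
      rw [hlc, hlx]
      simp only [Prod.mk.injEq]
      constructor <;> omega
    · rw [dif_neg h0]
      rw [cntR_neg ps 0 idx (by omega), sxR_neg ps 0 idx (by omega)]
      simp


theorem solveAdd_spec (N v : Int) :
    ∀ (n : Nat) (r : Int), (N + 1 - r).toNat = n → 0 ≤ r → ∀ (bc bx : List Int),
      bc.length = (N + 1).toNat → bx.length = (N + 1).toNat →
      (solveAdd N bc bx r v).1.length = (N + 1).toNat ∧ (solveAdd N bc bx r v).2.length = (N + 1).toNat ∧
      ∀ i : Int, 0 ≤ i →
        PySem.List.pyGetD (solveAdd N bc bx r v).1 i 0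
          = PySem.List.pyGetD bc i 0 + (if r ≤ i ∧ i ≤ N ∧ loI i ≤ r then 1 else 0) ∧
        PySem.List.pyGetD (solveAdd N bc bx r v).2 i 0
          = PySem.List.pyGetD bx i 0 + (if r ≤ i ∧ i ≤ N ∧ loI i ≤ r then v else 0) := by
  intro n
  induction n using Nat.strong_induction_on with
  | _ n ih =>
    intro r hn hr bc bx hlc hlx
    by_cases hrN : r ≤ N
    · have hlt := lt_nxI r hr
      have hstep : solveAdd N bc bx r v
          = solveAdd N (PySem.List.pySetD bc r (PySem.List.pyGetD bc r 0 + 1))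
                       (PySem.List.pySetD bx r (PySem.List.pyGetD bx r 0 + v)) (nxI r) v := by
        conv_lhs => rw [solveAdd]
        exact dif_pos ⟨hrN, hlt⟩
      have hnn : 0 ≤ nxI r := by omega
      obtain ⟨hL1, hL2, hptr⟩ := ih (N + 1 - nxI r).toNat (by omega) (nxI r) rfl hnn
        (PySem.List.pySetD bc r (PySem.List.pyGetD bc r 0 + 1))
        (PySem.List.pySetD bx r (PySem.List.pyGetD bx r 0 + v))
        (by rw [PySem.List.length_pySetD]; exact hlc)
        (by rw [PySem.List.length_pySetD]; exact hlx)
      rw [hstep]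
      refine ⟨hL1, hL2, ?_⟩
      intro i hi
      obtain ⟨hpc, hpx⟩ := hptr i hi
      have hrlen : r < (bc.length : Int) := by omega
      have hrlen2 : r < (bx.length : Int) := by omega
      have hgc := pyGetD_pySetD' bc r i (PySem.List.pyGetD bc r 0 + 1) hr hrlen hi
      have hgx := pyGetD_pySetD' bx r i (PySem.List.pyGetD bx r 0 + v) hr hrlen2 hi
      have hloler : loI r ≤ r := loI_le r hr
      have hiff : i ≠ r → ((nxI r ≤ i ∧ i ≤ N ∧ loI i ≤ nxI r) ↔ (r ≤ i ∧ i ≤ N ∧ loI i ≤ r)) := by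
        intro hir
        constructor
        · rintro ⟨h1, h2, h3⟩
          refine ⟨by omega, h2, ?_⟩
          have hm := loI_mono i (nxI r) (by omega) h3 h1
          have hml := loI_nxI_le r hr
          omega
        · rintro ⟨h1, h2, h3⟩
          have hri : r < i := lt_of_le_of_ne h1 (Ne.symm hir)
          exact ⟨nxI_le r i hr hri h3, h2, by omega⟩
      constructor
      · rw [hpc, hgc]
        by_cases hir : i = r
        · subst hir
          rw [if_pos rfl, if_neg (by omega), if_pos ⟨le_refl i, hrN, hloler⟩]
          ring
        · rw [if_neg hir, if_congr (hiff hir) rfl rfl]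
      · rw [hpx, hgx]
        by_cases hir : i = r
        · subst hir
          rw [if_pos rfl, if_neg (by omega), if_pos ⟨le_refl i, hrN, hloler⟩]
          ring
        · rw [if_neg hir, if_congr (hiff hir) rfl rfl]
    · have hstop : solveAdd N bc bx r v = (bc, bx) := by
        rw [solveAdd]
        exact dif_neg (by intro hcon; exact hrN hcon.1)
      rw [hstop]
      refine ⟨hlc, hlx, ?_⟩
      intro i hi
      rw [if_neg (by omega), if_neg (by omega)]
      exact ⟨by ring, by ring⟩


theorem FenInv_add (N : Int) (ps : List (Int × Int)) (bc bx : List Int) (p : Int × Int)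
    (hInv : FenInv N ps bc bx) (h0 : 0 ≤ p.2) (_hN : p.2 ≤ N) :
    FenInv N (ps ++ [p]) (solveAdd N bc bx p.2 p.1).1 (solveAdd N bc bx p.2 p.1).2 := by
  obtain ⟨hspec1, hspec2, hptr⟩ :=
    solveAdd_spec N p.1 (N + 1 - p.2).toNat p.2 rfl h0 bc bx hInv.1 hInv.2.1
  refine ⟨hspec1, hspec2, ?_⟩
  intro i hi hiN
  obtain ⟨hc, hx⟩ := hptr i hi
  obtain ⟨hoc, hox⟩ := hInv.2.2 i hi hiN
  constructor
  · rw [hc, hoc, cntR_append]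
    simp only [cntR]
    split_ifs <;> omega
  · rw [hx, hox, sxR_append]
    simp only [sxR]
    split_ifs <;> omega


theorem FenInv_init (N : Int) :
    FenInv N [] ((PySem.List.pyRange 0 (N + 1) 1).map (fun _ => (0 : Int)))
             ((PySem.List.pyRange 0 (N + 1) 1).map (fun _ => (0 : Int))) := by
  refine ⟨?_, ?_, ?_⟩
  · rw [List.length_map, PySem.List.length_pyRange_one]; omega
  · rw [List.length_map, PySem.List.length_pyRange_one]; omega
  · intro i hi hiN
    have h1 := PySem.List.pyGetD_map_pyRange_of_nonneg (fun _ => (0 : Int)) (N + 1) i 0 hi (by omega)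
    exact ⟨h1, h1⟩


theorem mainLoop (N : Int) (l : List (Int × Int)) :
    ∀ (ps : List (Int × Int)) (bc bx : List Int) (ans : Int), FenInv N ps bc bx →
      (∀ p ∈ l, 0 ≤ p.2 ∧ p.2 ≤ N) → (∀ e ∈ ps, 0 ≤ e.2) →
      (l.foldl (fun st p =>
          ((solveAdd N st.1 st.2.1 p.2 p.1).1,
           (solveAdd N st.1 st.2.1 p.2 p.1).2,
           st.2.2 + (solveGet st.1 st.2.1 0 0 p.2).1 * p.1 - (solveGet st.1 st.2.1 0 0 p.2).2)) (bc, bx, ans)).2.2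
        = ans + (pairSum gA (ps ++ l) - pairSum gA ps) := by
  induction l with
  | nil =>
    intro ps bc bx ans hInv hl hps
    simp
  | cons p l ih =>
    intro ps bc bx ans hInv hl hps
    rw [List.foldl_cons]
    simp only []
    have hp2 := hl p List.mem_cons_self
    rw [solveGet_spec N ps bc bx hInv (p.2 + 1).toNat p.2 rfl hp2.2 0 0]
    have hInv2 := FenInv_add N ps bc bx p hInv hp2.1 hp2.2
    rw [ih (ps ++ [p]) _ _ _ hInv2 (fun q hq => hl q (List.mem_cons_of_mem p hq))
      (by intro e he
          rcases List.mem_append.mp he with he1 | he1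
          · exact hps e he1
          · rw [List.mem_singleton.mp he1]; exact hp2.1)]
    have hctr : cntR ps 0 p.2 * p.1 - sxR ps 0 p.2 = (ps.map (fun e => gA e p)).sum :=
      contrib ps p.2 p.1 hps
    have happ := pairSum_append_singleton gA ps p
    have hassoc : (ps ++ [p]) ++ l = ps ++ p :: l := by
      rw [List.append_assoc, List.singleton_append]
    rw [hassoc]
    dsimp only
    simp only [zero_add]
    omega


/- ---------- sorted2 produces a lexicographically ordered list ---------- -/

theorem insertBy_pairwise_R {α : Type} (before : α → α → Bool)
    (hneg : ∀ a b c, before b a = false → before c b = false → before c a = false)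
    (hasym : ∀ a b, before a b = true → before b a = false)
    (x : α) (ys : List α) (h : ys.Pairwise (fun a b => before b a = false)) :
    (PySem.List.insertBy before x ys).Pairwise (fun a b => before b a = false) := by
  induction ys with
  | nil => simp [PySem.List.insertBy]
  | cons y ys ih =>
    rw [List.pairwise_cons] at h
    by_cases hb : before x y = true
    · rw [show PySem.List.insertBy before x (y :: ys) = x :: y :: ys by
        simp [PySem.List.insertBy, hb]]
      refine List.Pairwise.cons ?_ (List.Pairwise.cons h.1 h.2)
      intro z hz
      rcases List.mem_cons.mp hz with rfl | hz2
      · exact hasym x z hb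
      · exact hneg x y z (hasym x y hb) (h.1 z hz2)
    · have hb2 : before x y = false := by simpa using hb
      rw [show PySem.List.insertBy before x (y :: ys) = y :: PySem.List.insertBy before x ys by
        simp [PySem.List.insertBy, hb2]]
      refine List.Pairwise.cons ?_ (ih h.2)
      intro z hz
      rw [PySem.List.mem_insertBy] at hz
      rcases hz with rfl | hz2
      · exact hb2
      · exact h.1 z hz2


theorem sorted2_pairwise_lexLe (xs : List (Int × Int)) :
    (PySem.List.sorted2 xs (fun p => p.1) (fun p => p.2) false).Pairwise lexLe := by
  have hfold : ∀ (before : Int × Int → Int × Int → Bool),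
      (∀ a b c, before b a = false → before c b = false → before c a = false) →
      (∀ a b, before a b = true → before b a = false) →
      ∀ (l acc : List (Int × Int)), acc.Pairwise (fun a b => before b a = false) →
      (l.foldl (fun acc x => PySem.List.insertBy before x acc) acc).Pairwise
        (fun a b => before b a = false) := by
    intro before hneg hasym l
    induction l with
    | nil => intro acc hacc; exact hacc
    | cons x t ih =>
      intro acc hacc
      exact ih _ (insertBy_pairwise_R before hneg hasym x acc hacc)
  have hmain := hfold
    (fun a b => decide (a.1 < b.1) || (!decide (b.1 < a.1) && decide (a.2 < b.2)))
    (by intro a b c h1 h2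
        simp only [Bool.or_eq_false_iff, Bool.and_eq_false_iff, decide_eq_false_iff_not,
          Bool.not_eq_false', decide_eq_true_eq] at *
        omega)
    (by intro a b h1
        simp only [Bool.or_eq_true, Bool.and_eq_true, decide_eq_true_eq, Bool.not_eq_true',
          decide_eq_false_iff_not, Bool.or_eq_false_iff, Bool.and_eq_false_iff,
          Bool.not_eq_false'] at *
        omega)
    xs [] List.Pairwise.nil
  have heq : PySem.List.sorted2 xs (fun p => p.1) (fun p => p.2) false
      = xs.foldl (fun acc x => PySem.List.insertBy
          (fun a b => decide (a.1 < b.1) || (!decide (b.1 < a.1) && decide (a.2 < b.2))) x acc) [] := rfl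
  rw [heq]
  refine hmain.imp ?_
  intro a b hab
  simp only [Bool.or_eq_false_iff, Bool.and_eq_false_iff, decide_eq_false_iff_not,
    Bool.not_eq_false', decide_eq_true_eq] at hab
  unfold lexLe
  omega


/- ---------- ranks: index in sorted(set(S)) ---------- -/

theorem ss_pairwise (S : List String) :
    (PySem.List.sorted (PySem.Set.ofList S) (fun x => x) false).Pairwise (· < ·) :=
  PySem.List.sorted_ofList_pairwise_lt S

theorem ss_nodup (S : List String) :
    (PySem.List.sorted (PySem.Set.ofList S) (fun x => x) false).Nodup :=
  ((PySem.List.sorted_perm (PySem.Set.ofList S) (fun x => x) false).nodup_iff).mpr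
    (PySem.Set.nodup_ofList S)

theorem hlt_iff (a b : String) : PySem.Chars.strLt a.toList b.toList = true ↔ a < b := by
  unfold PySem.Chars.strLt
  rw [decide_eq_true_eq]
  exact (String.lt_iff_toList_lt).symm

theorem countP_str_le (l : List String) (s t : String) (hst : s ≤ t) :
    l.countP (fun x => PySem.Chars.strLt x.toList s.toList)
      ≤ l.countP (fun x => PySem.Chars.strLt x.toList t.toList) := by
  induction l with
  | nil => simp
  | cons a u ih =>
    rw [List.countP_cons, List.countP_cons]
    by_cases hb : PySem.Chars.strLt a.toList s.toList = true
    · rw [hb, ((hlt_iff a t).mpr (lt_of_lt_of_le ((hlt_iff a s).mp hb) hst) : _)]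
      omega
    · rw [Bool.not_eq_true] at hb
      rw [hb]
      simp only [Bool.false_eq_true, if_false]
      split_ifs <;> omega

theorem countP_str_strict (l : List String) (s t : String) (htl : t ∈ l) (hts : t < s) :
    l.countP (fun x => PySem.Chars.strLt x.toList t.toList)
      < l.countP (fun x => PySem.Chars.strLt x.toList s.toList) := by
  induction l with
  | nil => simp at htl
  | cons a u ih =>
    rw [List.countP_cons, List.countP_cons]
    have hmono := countP_str_le u t s (le_of_lt hts)
    rcases List.mem_cons.mp htl with rfl | htu
    · have h1 : PySem.Chars.strLt t.toList t.toList = false := by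
        rw [Bool.eq_false_iff]
        intro hh
        exact lt_irrefl t ((hlt_iff t t).mp hh)
      have h2 : PySem.Chars.strLt t.toList s.toList = true := (hlt_iff t s).mpr hts
      rw [h1, h2]
      simp only [Bool.false_eq_true, if_false, if_true]
      omega
    · have hih := ih htu
      by_cases hb : PySem.Chars.strLt a.toList t.toList = true
      · rw [hb, ((hlt_iff a s).mpr (lt_trans ((hlt_iff a t).mp hb) hts) : _)]
        omega
      · rw [Bool.not_eq_true] at hb
        rw [hb]
        simp only [Bool.false_eq_true, if_false]
        split_ifs <;> omega

theorem countP_lt_of_mem : ∀ (l : List String), l.Pairwise (· < ·) → ∀ s ∈ l,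
    l.countP (fun x => PySem.Chars.strLt x.toList s.toList) = l.idxOf s := by
  intro l
  induction l with
  | nil => intro _ s hs; simp at hs
  | cons a u ih =>
    intro hp s hs
    rw [List.pairwise_cons] at hp
    by_cases hsa : s = a
    · subst hsa
      have hhead : PySem.Chars.strLt s.toList s.toList = false := by
        rw [Bool.eq_false_iff]
        intro hh
        exact lt_irrefl s ((hlt_iff s s).mp hh)
      have htail : u.countP (fun x => PySem.Chars.strLt x.toList s.toList) = 0 :=
        List.countP_eq_zero.mpr (fun x hx hxx =>
          absurd ((hlt_iff x s).mp hxx) (not_lt.mpr (le_of_lt (hp.1 x hx))))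
      rw [List.countP_cons, List.idxOf_cons_self, htail, hhead]
      simp
    · have hsu : s ∈ u := by
        rcases List.mem_cons.mp hs with h | h
        · exact absurd h hsa
        · exact h
      have hhead : PySem.Chars.strLt a.toList s.toList = true := (hlt_iff a s).mpr (hp.1 s hsu)
      rw [List.countP_cons, ih hp.2 s hsu, List.idxOf_cons_ne _ (fun hh => hsa hh.symm), hhead]
      simp

theorem rank_eq_countP (S : List String) (s : String)
    (hs : s ∈ PySem.List.sorted (PySem.Set.ofList S) (fun x => x) false) :
    (((PySem.List.sorted (PySem.Set.ofList S) (fun x => x) false).idxOf s : Nat) : Int)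
      = (((PySem.Set.ofList S).countP (fun t => PySem.Chars.strLt t.toList s.toList) : Nat) : Int) := by
  have h1 := countP_lt_of_mem _ (ss_pairwise S) s hs
  have h2 := (PySem.List.sorted_perm (PySem.Set.ofList S) (fun x => x) false).countP_eq
    (fun t => PySem.Chars.strLt t.toList s.toList)
  rw [← h1, h2]

theorem rank_mono (S : List String) (s t : String)
    (hs : s ∈ PySem.List.sorted (PySem.Set.ofList S) (fun x => x) false)
    (ht : t ∈ PySem.List.sorted (PySem.Set.ofList S) (fun x => x) false) :
    ((((PySem.List.sorted (PySem.Set.ofList S) (fun x => x) false).idxOf s : Nat)) : Int)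
      ≤ (((PySem.List.sorted (PySem.Set.ofList S) (fun x => x) false).idxOf t : Nat) : Int) ↔ s ≤ t := by
  rw [rank_eq_countP S s hs, rank_eq_countP S t ht]
  rw [PySem.List.mem_sorted] at hs ht
  constructor
  · intro h
    by_contra hc
    have hts : t < s := not_le.mp hc
    have hstrict := countP_str_strict (PySem.Set.ofList S) s t ht hts
    omega
  · intro hst
    have hmono := countP_str_le (PySem.Set.ofList S) s t hst
    omega

theorem dict_fold_keep (l : List (Int × String)) (k : String) (d : PySem.Dict String Int)
    (hk : ∀ p ∈ l, p.2 ≠ k) :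
    (l.foldl (fun d p => d.insert p.2 p.1) d).get? k = d.get? k := by
  induction l generalizing d with
  | nil => rfl
  | cons p t ih =>
    rw [List.foldl_cons, ih _ (fun q hq => hk q (List.mem_cons_of_mem p hq)),
      PySem.Dict.get?_insert_of_ne d p.1 (Ne.symm (hk p List.mem_cons_self))]


theorem dict_fold_get : ∀ (ss : List String), ss.Nodup → ∀ (s : String), s ∈ ss → ∀ (st : Int) (d : PySem.Dict String Int),
    ((PySem.List.enumerate ss st).foldl (fun d p => d.insert p.2 p.1) d).get? s = some (st + ((ss.idxOf s : Nat) : Int)) := by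
  intro ss
  induction ss with
  | nil => intro _ s hs; simp at hs
  | cons a t ih =>
    intro hnd s hs st d
    obtain ⟨ha, hndt⟩ := List.nodup_cons.mp hnd
    rw [PySem.List.enumerate_cons, List.foldl_cons]
    rcases List.mem_cons.mp hs with rfl | hs2
    · rw [dict_fold_keep _ _ _ (fun p hp => ?_), PySem.Dict.get?_insert_self]
      · simp [List.idxOf_cons_self]
      · have hp2 : p.2 ∈ t := by
          have hm := List.mem_map_of_mem (f := fun q : Int × String => q.2) hp
          rwa [PySem.List.map_snd_enumerate] at hm
        intro hcon
        exact ha (hcon ▸ hp2)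
    · have hne : a ≠ s := by rintro rfl; exact ha hs2
      rw [ih hndt s hs2 (st + 1) (d.insert a st)]
      congr 1
      rw [List.idxOf_cons_ne _ hne]
      push_cast
      ring


/- ---------- B's loop is the pair sum ---------- -/

theorem solveAltLoop_eq : ∀ (l : List (Int × String)) (total : Int),
    solveAltLoop l total = total + pairSum hpair l := by
  intro l
  induction l with
  | nil => intro total; simp [solveAltLoop, pairSum]
  | cons p t ih =>
    intro total
    rw [solveAltLoop, PySem.List.foldl_add t (fun q => hpair p q) total, ih, pairSum]
    ring


/- ---------- main equivalence ---------- -/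

theorem hR_symm : ∀ a b : Int × Int, hR a b = hR b a := by
  intro a b
  unfold hR
  split_ifs <;> omega

theorem gA_eq_hR_of_lexLe : ∀ a b : Int × Int, lexLe a b → gA a b = hR a b := by
  intro a b hab
  unfold gA hR
  unfold lexLe at hab
  split_ifs <;> omega

theorem solve_eq_alt (N : Int) (X : List Int) (S : List String) (hpre : Pre_solve N X S) :
    solve N X S = solve_alt N X S := by
  have hmemss : ∀ p ∈ X.zip S, p.2 ∈ PySem.List.sorted (PySem.Set.ofList S) (fun x => x) false := by
    intro p hp
    rw [PySem.List.mem_sorted, PySem.Set.mem_ofList]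
    exact (List.of_mem_zip hp).2
  have hxs : (X.zip S).map (fun p => (p.1,
        ((((PySem.List.enumerate (PySem.List.sorted (PySem.Set.ofList S) (fun x => x) false) 0).foldl
            (fun d q => d.insert q.2 q.1) (PySem.Dict.empty : PySem.Dict String Int)).get? p.2).getD 0)))
      = (X.zip S).map (fun p => (p.1,
        (((PySem.List.sorted (PySem.Set.ofList S) (fun x => x) false).idxOf p.2 : Nat) : Int))) := by
    apply List.map_congr_left
    intro p hp
    rw [dict_fold_get _ (ss_nodup S) p.2 (hmemss p hp) 0 _]
    simp
  have hperm := PySem.List.sorted2_perm ((X.zip S).map (fun p => (p.1,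
      (((PySem.List.sorted (PySem.Set.ofList S) (fun x => x) false).idxOf p.2 : Nat) : Int))))
      (fun p => p.1) (fun p => p.2) false
  have hrk : ∀ q ∈ PySem.List.sorted2 ((X.zip S).map (fun p => (p.1,
      (((PySem.List.sorted (PySem.Set.ofList S) (fun x => x) false).idxOf p.2 : Nat) : Int))))
      (fun p => p.1) (fun p => p.2) false, 0 ≤ q.2 ∧ q.2 ≤ N := by
    intro q hq
    obtain ⟨p, hp, hfp⟩ := List.mem_map.mp (hperm.mem_iff.mp hq)
    have hb := hpre p hp
    rw [← rank_eq_countP S p.2 (hmemss p hp)] at hb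
    rw [← hfp]
    exact ⟨Int.natCast_nonneg _, hb⟩
  have hmain := mainLoop N (PySem.List.sorted2 ((X.zip S).map (fun p => (p.1,
      (((PySem.List.sorted (PySem.Set.ofList S) (fun x => x) false).idxOf p.2 : Nat) : Int))))
      (fun p => p.1) (fun p => p.2) false) []
      ((PySem.List.pyRange 0 (N + 1) 1).map (fun _ => (0 : Int)))
      ((PySem.List.pyRange 0 (N + 1) 1).map (fun _ => (0 : Int))) 0
      (FenInv_init N) hrk (by intro e he; simp at he)
  simp only [List.nil_append, pairSum, sub_zero, zero_add] at hmain
  calc solve N X S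
      = pairSum gA (PySem.List.sorted2 ((X.zip S).map (fun p => (p.1,
          (((PySem.List.sorted (PySem.Set.ofList S) (fun x => x) false).idxOf p.2 : Nat) : Int))))
          (fun p => p.1) (fun p => p.2) false) := by
        unfold solve
        rw [hxs]
        exact hmain
    _ = pairSum hR (PySem.List.sorted2 ((X.zip S).map (fun p => (p.1,
          (((PySem.List.sorted (PySem.Set.ofList S) (fun x => x) false).idxOf p.2 : Nat) : Int))))
          (fun p => p.1) (fun p => p.2) false) :=
        pairSum_congr_pairwise (sorted2_pairwise_lexLe _) gA hR gA_eq_hR_of_lexLe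
    _ = pairSum hR ((X.zip S).map (fun p => (p.1,
          (((PySem.List.sorted (PySem.Set.ofList S) (fun x => x) false).idxOf p.2 : Nat) : Int)))) :=
        pairSum_perm hR hR_symm hperm
    _ = pairSum (fun a b => hR ((fun p : Int × String => (p.1,
          (((PySem.List.sorted (PySem.Set.ofList S) (fun x => x) false).idxOf p.2 : Nat) : Int))) a)
          ((fun p : Int × String => (p.1,
          (((PySem.List.sorted (PySem.Set.ofList S) (fun x => x) false).idxOf p.2 : Nat) : Int))) b))
          (X.zip S) := pairSum_map _ _ _
    _ = pairSum hpair (X.zip S) := by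
        apply pairSum_congr_mem
        intro a ha b hb
        have h1 := rank_mono S a.2 b.2 (hmemss a ha) (hmemss b hb)
        have h2 := rank_mono S b.2 a.2 (hmemss b hb) (hmemss a ha)
        simp only [hR, hpair, h1, h2]
    _ = solve_alt N X S := by
        unfold solve_alt
        rw [solveAltLoop_eq (X.zip S) 0, zero_add]

-- ===== VERDICT (by name: the statement is the Claim_ definition above) =====
theorem solve_spec : Claim_equal_solve := by
  intro N X S _ hpre
  unfold Spec_solve
  exact solve_eq_alt N X S hpre
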